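-- pv_equiv track=rewrite | github.com/maishapatodia11/Composers-Assistant---Python | Composer's Assistant - Final Project/Code/main.py | midiraagweight
-- ===== SOURCE A (Python) =====
-- def midiraagweight(raag, raaglist):         # makes a list of probabilities of each MIDI number (favours different notes for each raag) - works similar to scaleweight
--     raagweight = []
--     # could also be modified to be based on phrases of melodies, instead of individual notes
--     if raag == 'Raag Yaman' :
--         for i in range(1,(len(raaglist)+1)):
--             if i == 3 or (i-3)%7 == 0 :         # 3rd and 7th most important
--                 raagweight.append(32)
--             elif i%7 == 0 :
--                 raagweight.append(23)
--             else :
--                 raagweight.append(9)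
--
--     if raag == 'Raag Bhairav' :
--         for i in range(1,(len(raaglist)+1)):
--             if (i+1)%7 == 0 :         # 6th and 2nd most important
--                 raagweight.append(32)
--             elif (i-2)%7 == 0 :
--                 raagweight.append(23)
--             else :
--                 raagweight.append(9)
--
--     if raag == 'Raag Bilawal' :
--         for i in range(1,(len(raaglist)+1)):
--             if (i+1)%7 == 0 :         # 6th and 3th most important
--                 raagweight.append(32)
--             elif (i-3)%7 == 0 :
--                 raagweight.append(23)
--             else :
--                 raagweight.append(9)
--
--     return raagweight
-- ===== SOURCE B (Python) =====
-- # Table-driven: each raag maps to a length-7 weight pattern indexed by i % 7.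
-- _PATTERNS = {
--     'Raag Yaman':   [23, 9, 9, 32, 9, 9, 9],
--     'Raag Bhairav': [9, 9, 23, 9, 9, 9, 32],
--     'Raag Bilawal': [9, 9, 9, 23, 9, 9, 32],
-- }
--
-- def midiraagweight(raag, raaglist):
--     pat = _PATTERNS.get(raag)
--     if pat is None:
--         return []
--     return [pat[i % 7] for i in range(1, len(raaglist) + 1)]
-- ===== Notes on version B (the rewrite author's own statement) =====
-- stated objective: simpler
-- what changed: Replaced the three per-raag if/elif cascades over a loop with a single dict of length-7 residue patterns and one comprehension emitting pattern[i % 7].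
import Mathlib
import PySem

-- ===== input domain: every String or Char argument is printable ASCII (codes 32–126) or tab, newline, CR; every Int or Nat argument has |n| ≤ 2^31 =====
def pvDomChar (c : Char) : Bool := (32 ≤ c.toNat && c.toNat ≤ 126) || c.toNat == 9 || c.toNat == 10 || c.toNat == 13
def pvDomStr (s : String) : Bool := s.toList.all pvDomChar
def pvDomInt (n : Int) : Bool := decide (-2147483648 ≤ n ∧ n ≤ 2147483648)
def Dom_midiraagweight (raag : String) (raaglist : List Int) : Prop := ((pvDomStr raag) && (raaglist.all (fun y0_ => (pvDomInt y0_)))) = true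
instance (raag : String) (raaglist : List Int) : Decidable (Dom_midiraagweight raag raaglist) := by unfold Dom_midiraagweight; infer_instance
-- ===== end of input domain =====

-- B replaces A's three branch cascades with one residue-pattern table and a single comprehension (simpler, same cost).

-- ===== PORT A =====
def midiraagweight (raag : String) (raaglist : List Int) : List Int :=
  let raagweight : List Int := []
  let raagweight :=
    if raag == "Raag Yaman" then
      (PySem.List.pyRange 1 ((raaglist.length : Int) + 1) 1).foldl (fun acc i =>
        if i == 3 || PySem.Int.mod (i - 3) 7 == 0 then acc ++ [32]
        else if PySem.Int.mod i 7 == 0 then acc ++ [23]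
        else acc ++ [9]) raagweight
    else raagweight
  let raagweight :=
    if raag == "Raag Bhairav" then
      (PySem.List.pyRange 1 ((raaglist.length : Int) + 1) 1).foldl (fun acc i =>
        if PySem.Int.mod (i + 1) 7 == 0 then acc ++ [32]
        else if PySem.Int.mod (i - 2) 7 == 0 then acc ++ [23]
        else acc ++ [9]) raagweight
    else raagweight
  let raagweight :=
    if raag == "Raag Bilawal" then
      (PySem.List.pyRange 1 ((raaglist.length : Int) + 1) 1).foldl (fun acc i =>
        if PySem.Int.mod (i + 1) 7 == 0 then acc ++ [32]
        else if PySem.Int.mod (i - 3) 7 == 0 then acc ++ [23]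
        else acc ++ [9]) raagweight
    else raagweight
  raagweight

-- ===== PORT B =====
def pvPatterns : PySem.Dict String (List Int) :=
  PySem.Dict.ofList
    [("Raag Yaman",   [23, 9, 9, 32, 9, 9, 9]),
     ("Raag Bhairav", [9, 9, 23, 9, 9, 9, 32]),
     ("Raag Bilawal", [9, 9, 9, 23, 9, 9, 32])]

def midiraagweight_alt (raag : String) (raaglist : List Int) : List Int :=
  match pvPatterns.get? raag with
  | none => []
  | some pat =>
      -- pat[i % 7]: index is always in range (0 ≤ i % 7 < 7 = len pat), so pyGetD is exact here
      (PySem.List.pyRange 1 ((raaglist.length : Int) + 1) 1).map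
        (fun i => PySem.List.pyGetD pat (PySem.Int.mod i 7) 0)

-- ===== PRECONDITION & SPEC =====
def Spec_midiraagweight (raag : String) (raaglist : List Int) (out : List Int) : Prop := out = midiraagweight_alt raag raaglist
instance (raag : String) (raaglist : List Int) (out : List Int) : Decidable (Spec_midiraagweight raag raaglist out) := by unfold Spec_midiraagweight; infer_instance

-- ===== CLAIM (what is proved, stated in full; the proofs are below) =====
def Claim_equal_midiraagweight : Prop := ∀ (raag : String) (raaglist : List Int), Dom_midiraagweight raag raaglist → Spec_midiraagweight raag raaglist (midiraagweight raag raaglist)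

-- ===== LEMMAS AND PROOFS =====

theorem pv_yaman_pt (i : Int) :
    (if i == 3 || PySem.Int.mod (i - 3) 7 == 0 then (32 : Int)
     else if PySem.Int.mod i 7 == 0 then 23 else 9)
      = PySem.List.pyGetD [23, 9, 9, 32, 9, 9, 9] (PySem.Int.mod i 7) 0 := by
  rw [PySem.Int.mod_eq_emod_of_pos (by omega), PySem.Int.mod_eq_emod_of_pos (by omega)]
  simp only [Bool.or_eq_true, beq_iff_eq]
  split_ifs with h1 h2
  · have : i % 7 = 3 := by omega
    rw [this]; decide
  · rw [h2]; decide
  · have : i % 7 = 1 ∨ i % 7 = 2 ∨ i % 7 = 4 ∨ i % 7 = 5 ∨ i % 7 = 6 := by omega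
    rcases this with h | h | h | h | h <;> rw [h] <;> decide

theorem pv_bhairav_pt (i : Int) :
    (if PySem.Int.mod (i + 1) 7 == 0 then (32 : Int)
     else if PySem.Int.mod (i - 2) 7 == 0 then 23 else 9)
      = PySem.List.pyGetD [9, 9, 23, 9, 9, 9, 32] (PySem.Int.mod i 7) 0 := by
  rw [PySem.Int.mod_eq_emod_of_pos (by omega), PySem.Int.mod_eq_emod_of_pos (by omega),
      PySem.Int.mod_eq_emod_of_pos (by omega)]
  simp only [beq_iff_eq]
  split_ifs with h1 h2
  · have : i % 7 = 6 := by omega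
    rw [this]; decide
  · have : i % 7 = 2 := by omega
    rw [this]; decide
  · have : i % 7 = 0 ∨ i % 7 = 1 ∨ i % 7 = 3 ∨ i % 7 = 4 ∨ i % 7 = 5 := by omega
    rcases this with h | h | h | h | h <;> rw [h] <;> decide

theorem pv_bilawal_pt (i : Int) :
    (if PySem.Int.mod (i + 1) 7 == 0 then (32 : Int)
     else if PySem.Int.mod (i - 3) 7 == 0 then 23 else 9)
      = PySem.List.pyGetD [9, 9, 9, 23, 9, 9, 32] (PySem.Int.mod i 7) 0 := by
  rw [PySem.Int.mod_eq_emod_of_pos (by omega), PySem.Int.mod_eq_emod_of_pos (by omega),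
      PySem.Int.mod_eq_emod_of_pos (by omega)]
  simp only [beq_iff_eq]
  split_ifs with h1 h2
  · have : i % 7 = 6 := by omega
    rw [this]; decide
  · have : i % 7 = 3 := by omega
    rw [this]; decide
  · have : i % 7 = 0 ∨ i % 7 = 1 ∨ i % 7 = 2 ∨ i % 7 = 4 ∨ i % 7 = 5 := by omega
    rcases this with h | h | h | h | h <;> rw [h] <;> decide

-- ===== VERDICT (by name: the statement is the Claim_ definition above) =====
theorem midiraagweight_spec : Claim_equal_midiraagweight := by
  intro raag raaglist _
  unfold Spec_midiraagweight midiraagweight midiraagweight_alt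
  by_cases h1 : raag = "Raag Yaman"
  · subst h1
    have g2 : ("Raag Yaman" == "Raag Bhairav") = false := by decide
    have g3 : ("Raag Yaman" == "Raag Bilawal") = false := by decide
    have hp : pvPatterns.get? "Raag Yaman" = some [23, 9, 9, 32, 9, 9, 9] := by decide
    simp only [beq_self_eq_true, if_true, g2, g3, Bool.false_eq_true, if_false, hp]
    have hf : (fun (acc : List Int) (i : Int) =>
        if i == 3 || PySem.Int.mod (i - 3) 7 == 0 then acc ++ [32]
        else if PySem.Int.mod i 7 == 0 then acc ++ [23] else acc ++ [9])
      = fun (acc : List Int) (i : Int) => acc ++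
        [if i == 3 || PySem.Int.mod (i - 3) 7 == 0 then (32 : Int)
         else if PySem.Int.mod i 7 == 0 then 23 else 9] := by
      funext acc i; split_ifs <;> rfl
    rw [hf, PySem.List.foldl_append_singleton_eq_map, List.nil_append]
    exact List.map_congr_left (fun i _ => pv_yaman_pt i)
  · by_cases h2 : raag = "Raag Bhairav"
    · subst h2
      have g1 : ("Raag Bhairav" == "Raag Yaman") = false := by decide
      have g3 : ("Raag Bhairav" == "Raag Bilawal") = false := by decide
      have hp : pvPatterns.get? "Raag Bhairav" = some [9, 9, 23, 9, 9, 9, 32] := by decide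
      simp only [beq_self_eq_true, if_true, g1, g3, Bool.false_eq_true, if_false, hp]
      have hf : (fun (acc : List Int) (i : Int) =>
          if PySem.Int.mod (i + 1) 7 == 0 then acc ++ [32]
          else if PySem.Int.mod (i - 2) 7 == 0 then acc ++ [23] else acc ++ [9])
        = fun (acc : List Int) (i : Int) => acc ++
          [if PySem.Int.mod (i + 1) 7 == 0 then (32 : Int)
           else if PySem.Int.mod (i - 2) 7 == 0 then 23 else 9] := by
        funext acc i; split_ifs <;> rfl
      rw [hf, PySem.List.foldl_append_singleton_eq_map, List.nil_append]
      exact List.map_congr_left (fun i _ => pv_bhairav_pt i)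
    · by_cases h3 : raag = "Raag Bilawal"
      · subst h3
        have g1 : ("Raag Bilawal" == "Raag Yaman") = false := by decide
        have g2 : ("Raag Bilawal" == "Raag Bhairav") = false := by decide
        have hp : pvPatterns.get? "Raag Bilawal" = some [9, 9, 9, 23, 9, 9, 32] := by decide
        simp only [beq_self_eq_true, if_true, g1, g2, Bool.false_eq_true, if_false, hp]
        have hf : (fun (acc : List Int) (i : Int) =>
            if PySem.Int.mod (i + 1) 7 == 0 then acc ++ [32]
            else if PySem.Int.mod (i - 3) 7 == 0 then acc ++ [23] else acc ++ [9])
          = fun (acc : List Int) (i : Int) => acc ++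
            [if PySem.Int.mod (i + 1) 7 == 0 then (32 : Int)
             else if PySem.Int.mod (i - 3) 7 == 0 then 23 else 9] := by
          funext acc i; split_ifs <;> rfl
        rw [hf, PySem.List.foldl_append_singleton_eq_map, List.nil_append]
        exact List.map_congr_left (fun i _ => pv_bilawal_pt i)
      · have hp : pvPatterns.get? raag = none := by
          have e : pvPatterns = PySem.Dict.mk
              [("Raag Yaman", [23, 9, 9, 32, 9, 9, 9]),
               ("Raag Bhairav", [9, 9, 23, 9, 9, 9, 32]),
               ("Raag Bilawal", [9, 9, 9, 23, 9, 9, 32])] := by decide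
          rw [e]
          simp [PySem.Dict.get?, Ne.symm h1, Ne.symm h2, Ne.symm h3]
        simp only [beq_eq_false_iff_ne.mpr h1, beq_eq_false_iff_ne.mpr h2,
          beq_eq_false_iff_ne.mpr h3, Bool.false_eq_true, if_false, hp]
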